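-- pv_equiv track=rewrite | github.com/DinisPereira-a107199/ATP2024 | Projeto/Código/sistema.py | listarKeyword
-- ===== SOURCE A (Python) =====
-- def listarKeyword(bd):
--     res = []
--     lista_aux = []
--     for d in bd:
--         if "keywords" in d.keys():
--             keywords = d['keywords'].split(",")
--             for elem in keywords:
--                 for i,letra in enumerate(elem):
--                     if letra == "/" or letra == "(":
--                         elem = elem[0:i]
--                 elem2 = elem.upper().strip().strip(".")
--                 if elem2 not in lista_aux:
--                     lista_aux.append(elem2)
--                     res.append(elem.strip())
--     return res
-- ===== SOURCE B (Python) =====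
-- def listarKeyword(bd):
--     res = []
--     seen = set()
--     for d in bd:
--         if "keywords" in d:
--             for elem in d["keywords"].split(","):
--                 p = elem.find("/")
--                 cut = elem[:p] if p != -1 else elem
--                 q = cut.find("(")
--                 if q != -1:
--                     cut = cut[:q]
--                 key = cut.upper().strip().strip(".")
--                 if key not in seen:
--                     seen.add(key)
--                     res.append(cut.strip())
--     return res
-- ===== Notes on version B (the rewrite author's own statement) =====
-- stated objective: idiomatic
-- what changed: replaces the character-by-character enumerate loop that repeatedly re-slices the keyword with a direct find-based truncation at the first '/' or '(', and replaces the list-membership dedup with a set of seen normalized keys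
import Mathlib
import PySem

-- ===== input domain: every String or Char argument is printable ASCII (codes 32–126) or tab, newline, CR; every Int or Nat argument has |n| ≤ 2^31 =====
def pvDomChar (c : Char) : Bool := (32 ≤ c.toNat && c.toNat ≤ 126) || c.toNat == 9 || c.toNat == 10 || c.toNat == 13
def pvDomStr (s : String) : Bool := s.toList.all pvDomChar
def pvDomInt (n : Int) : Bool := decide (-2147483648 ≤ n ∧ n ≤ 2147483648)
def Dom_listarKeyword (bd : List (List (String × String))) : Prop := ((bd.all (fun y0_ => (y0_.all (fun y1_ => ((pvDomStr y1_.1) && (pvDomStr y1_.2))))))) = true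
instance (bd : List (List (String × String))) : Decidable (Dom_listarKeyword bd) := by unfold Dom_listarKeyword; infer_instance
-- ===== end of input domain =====

-- B truncates each comma-separated keyword at the first '/' or '(' via find+slice and dedups
-- with a set of seen normalized keys, instead of A's per-character enumerate loop that
-- repeatedly re-slices the string and A's list-membership dedup.

-- ===== PORT A =====
-- "keywords" in d.keys() / d['keywords'] : first-match association-list lookup
def pvLookupA (d : List (String × String)) : Option String :=
  (d.find? (fun p => p.1 == "keywords")).map (·.2)

-- for i,letra in enumerate(elem): if letra == "/" or letra == "(": elem = elem[0:i]
-- (the enumerate iterator is created once, over the original elem)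
def pvTruncA (e : List Char) : List Char :=
  (PySem.List.enumerate e).foldl
    (fun cur p => if p.2 = '/' ∨ p.2 = '(' then PySem.List.slice cur (some 0) (some p.1) else cur) e

def listarKeyword (bd : List (List (String × String))) : List String :=
  (bd.foldl (fun st d =>
      match pvLookupA d with
      | none => st
      | some kw =>
        (PySem.Chars.splitOn kw.toList [',']).foldl (fun st2 elem =>
            let t := pvTruncA elem
            let elem2 := PySem.Chars.stripChars (PySem.Chars.strip (PySem.Chars.upper t)) ['.']
            if st2.2.contains elem2 then st2
            else (st2.1 ++ [String.ofList (PySem.Chars.strip t)], st2.2 ++ [elem2])) st)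
    (([] : List String), ([] : List (List Char)))).1

-- ===== PORT B =====
-- p = elem.find("/"); cut = elem[:p] if p != -1 else elem; q = cut.find("("); if q != -1: cut = cut[:q]
def pvCutB (e : List Char) : List Char :=
  let p := PySem.Chars.find e ['/']
  let cut := if p ≠ -1 then PySem.List.slice e none (some p) else e
  let q := PySem.Chars.find cut ['(']
  if q ≠ -1 then PySem.List.slice cut none (some q) else cut

def listarKeyword_alt (bd : List (List (String × String))) : List String :=
  (bd.foldl (fun st d =>
      match List.lookup "keywords" d with
      | none => st
      | some kw =>
        (PySem.Chars.splitOn kw.toList [',']).foldl (fun st2 elem =>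
            let cut := pvCutB elem
            let key := PySem.Chars.stripChars (PySem.Chars.strip (PySem.Chars.upper cut)) ['.']
            if PySem.Set.contains st2.2 key then st2
            else (st2.1 ++ [String.ofList (PySem.Chars.strip cut)], PySem.Set.add st2.2 key)) st)
    (([] : List String), (PySem.Set.empty : PySem.Set (List Char)))).1

-- ===== PRECONDITION & SPEC =====
def Spec_listarKeyword (bd : List (List (String × String))) (out : List String) : Prop := out = listarKeyword_alt bd
instance (bd : List (List (String × String))) (out : List String) : Decidable (Spec_listarKeyword bd out) := by unfold Spec_listarKeyword; infer_instance

-- ===== CLAIM (what is proved, stated in full; the proofs are below) =====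
def Claim_equal_listarKeyword : Prop := ∀ (bd : List (List (String × String))), Dom_listarKeyword bd → Spec_listarKeyword bd (listarKeyword bd)

-- ===== LEMMAS AND PROOFS =====

-- first-match lookup agreement
theorem pvLookup_eq (d : List (String × String)) : pvLookupA d = List.lookup "keywords" d := by
  induction d with
  | nil => rfl
  | cons p rest ih =>
    obtain ⟨k, v⟩ := p
    by_cases h : k = "keywords"
    · subst h; simp [pvLookupA, List.lookup]
    · have h1 : (k == "keywords") = false := by simp [h]
      have h2 : ("keywords" == k) = false := by simp [Ne.symm h]
      simpa [pvLookupA, List.lookup, h1, h2] using ih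

-- A's inner loop never changes the state while no delimiter occurs
theorem pvFold_no_delim (xs : List Char) (s : Int) (e : List Char)
    (h : ∀ x ∈ xs, ¬(x = '/' ∨ x = '(')) :
    (PySem.List.enumerate xs s).foldl
      (fun cur p => if p.2 = '/' ∨ p.2 = '(' then PySem.List.slice cur (some 0) (some p.1) else cur) e = e := by
  induction xs generalizing s with
  | nil => rfl
  | cons x xs ih =>
    rw [PySem.List.enumerate_cons]
    simp only [List.foldl_cons]
    rw [if_neg (h x (by simp))]
    exact ih (s+1) (fun y hy => h y (by simp [hy]))

-- once the state is no longer than every remaining index, further slicing is the identity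
theorem pvFold_stable (xs : List Char) (s : Int) (e : List Char)
    (hs : (e.length : Int) ≤ s) :
    (PySem.List.enumerate xs s).foldl
      (fun cur p => if p.2 = '/' ∨ p.2 = '(' then PySem.List.slice cur (some 0) (some p.1) else cur) e = e := by
  induction xs generalizing s with
  | nil => rfl
  | cons x xs ih =>
    rw [PySem.List.enumerate_cons]
    simp only [List.foldl_cons]
    have hslice : (if x = '/' ∨ x = '(' then PySem.List.slice e (some 0) (some s) else e) = e := by
      split
      · rw [PySem.List.slice_zero_start, PySem.List.slice_to e (by omega)]
        exact List.take_of_length_le (by omega)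
      · rfl
    rw [hslice]
    exact ih (s+1) (by omega)

theorem pvEnum_append (xs ys : List Char) (s : Int) :
    PySem.List.enumerate (xs ++ ys) s
      = PySem.List.enumerate xs s ++ PySem.List.enumerate ys (s + xs.length) := by
  induction xs generalizing s with
  | nil => simp [PySem.List.enumerate]
  | cons x xs ih =>
    simp only [List.cons_append, PySem.List.enumerate_cons, List.length_cons]
    rw [ih (s+1)]
    have harg : (((xs.length + 1 : Nat)) : Int) = (xs.length : Int) + 1 := by push_cast; ring
    rw [harg, add_assoc, add_comm 1 ((xs.length : Int))]

theorem pvDropWhile_head_false {p : Char → Bool} {c : Char} {b : List Char}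
    (l : List Char) (h : l.dropWhile p = c :: b) : p c = false := by
  induction l with
  | nil => simp at h
  | cons x xs ih =>
    rw [List.dropWhile_cons] at h
    split at h
    · exact ih h
    · next hpx =>
      cases h
      simpa using hpx

-- A's truncation loop computes the longest delimiter-free prefix
theorem pvTruncA_eq_takeWhile (e : List Char) :
    pvTruncA e = e.takeWhile (fun c => !(c == '/' || c == '(')) := by
  have hsplit := List.takeWhile_append_dropWhile
    (p := fun c => !(c == '/' || c == '(')) (l := e)
  cases hd : e.dropWhile (fun c => !(c == '/' || c == '(')) with
  | nil =>
    have hall : ∀ x ∈ e, ¬(x = '/' ∨ x = '(') := by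
      intro x hx
      have := (List.dropWhile_eq_nil_iff).1 hd x hx
      simpa using this
    have hallp : ∀ x ∈ e, (!(x == '/' || x == '(')) = true := by
      intro x hx
      simpa using hall x hx
    rw [List.takeWhile_eq_self_iff.2 hallp]
    exact pvFold_no_delim e 0 e hall
  | cons c b =>
    have hpc : (!(c == '/' || c == '(')) = false := pvDropWhile_head_false e hd
    have hc : c = '/' ∨ c = '(' := by
      have h' : ¬c = '/' → c = '(' := by simpa using hpc
      by_cases h1 : c = '/'
      · exact Or.inl h1
      · exact Or.inr (h' h1)
    have he : e = e.takeWhile (fun c => !(c == '/' || c == '(')) ++ (c :: b) := by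
      rw [← hd, hsplit]
    set a := e.takeWhile (fun c => !(c == '/' || c == '(')) with ha
    have hmem : ∀ x ∈ a, ¬(x = '/' ∨ x = '(') := by
      intro x hx
      have := List.mem_takeWhile_imp hx
      simpa using this
    unfold pvTruncA
    rw [he, pvEnum_append, List.foldl_append,
        pvFold_no_delim a 0 (a ++ c :: b) hmem,
        PySem.List.enumerate_cons, List.foldl_cons, if_pos hc,
        PySem.List.slice_zero_start, PySem.List.slice_to _ (by omega)]
    have htake : List.take (0 + (a.length : Int)).toNat (a ++ c :: b) = a := by
      have : (0 + (a.length : Int)).toNat = a.length := by omega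
      rw [this, List.take_left]
    rw [htake]
    exact pvFold_stable b _ a (by omega)

-- take up to the first failure of p is takeWhile p
theorem pvTake_eq_takeWhile {p : Char → Bool} :
    ∀ (e : List Char) (n : Nat),
      (∀ i < n, ∀ x, e[i]? = some x → p x = true) →
      (∀ x, e[n]? = some x → p x = false) →
      e.take n = e.takeWhile p := by
  intro e
  induction e with
  | nil => simp
  | cons a as ih =>
    intro n h1 h2
    cases n with
    | zero =>
      have := h2 a (by simp)
      simp [this]
    | succ m =>
      have hpa : p a = true := h1 0 (by omega) a (by simp)
      simp only [List.take_succ_cons, List.takeWhile_cons, hpa, if_pos]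
      rw [ih m (fun i hi x hx => h1 (i+1) (by omega) x (by simpa using hx))
            (fun x hx => h2 x (by simpa using hx))]

-- B's find-based cut at one character is the longest c-free prefix
theorem pvCut_find (e : List Char) (c : Char) :
    (if PySem.Chars.find e [c] ≠ -1 then PySem.List.slice e none (some (PySem.Chars.find e [c])) else e)
      = e.takeWhile (fun x => x != c) := by
  by_cases h : PySem.Chars.find e [c] = -1
  · rw [if_neg (by simpa using h)]
    have hnin : c ∉ e := by
      intro hc
      apply (PySem.Chars.find_eq_neg_one_iff e [c]).1 h
      obtain ⟨l₁, l₂, hsp⟩ := List.append_of_mem hc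
      exact ⟨l₁, l₂, by rw [hsp]; simp⟩
    symm
    apply List.takeWhile_eq_self_iff.2
    intro x hx
    simp only [bne_iff_ne, ne_eq]
    intro hxc
    exact hnin (hxc ▸ hx)
  · rw [if_pos h]
    have h0 : 0 ≤ PySem.Chars.find e [c] := by
      have := PySem.Chars.neg_one_le_find (s := e) (sub := [c])
      omega
    obtain ⟨hpre, hmin⟩ := PySem.Chars.find_spec h0
    set n := (PySem.Chars.find e [c]).toNat with hn
    have hen : e[n]? = some c := by
      obtain ⟨t, ht⟩ := hpre
      rw [← List.head?_drop, ← ht]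
      rfl
    have hlt : ∀ i < n, ∀ x, e[i]? = some x → (x != c) = true := by
      intro i hi x hx
      simp only [bne_iff_ne, ne_eq]
      intro hxc
      subst hxc
      apply hmin i hi
      have hhd : (List.drop i e).head? = some x := by rw [List.head?_drop]; exact hx
      cases hdi : List.drop i e with
      | nil => rw [hdi] at hhd; simp at hhd
      | cons y ys =>
        rw [hdi] at hhd
        simp only [List.head?_cons, Option.some.injEq] at hhd
        exact ⟨ys, by simp [hhd]⟩
    rw [PySem.List.slice_to e h0]
    exact pvTake_eq_takeWhile e n hlt
      (fun x hx => by simp only [hen, Option.some.injEq] at hx; simp [hx])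

theorem pvTW_TW (p q : Char → Bool) (l : List Char) :
    (l.takeWhile p).takeWhile q = l.takeWhile (fun x => p x && q x) := by
  induction l with
  | nil => rfl
  | cons a as ih =>
    by_cases hp : p a
    · by_cases hq : q a <;> simp [hp, hq, ih]
    · simp [hp]

theorem pvCutB_eq_takeWhile (e : List Char) :
    pvCutB e = e.takeWhile (fun c => !(c == '/' || c == '(')) := by
  unfold pvCutB
  simp only [pvCut_find, pvTW_TW]
  congr 1
  funext x
  by_cases h1 : x = '/' <;> by_cases h2 : x = '(' <;> simp [bne, h1, h2]

theorem pvTrunc_eq_cut (e : List Char) : pvTruncA e = pvCutB e := by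
  rw [pvTruncA_eq_takeWhile, pvCutB_eq_takeWhile]

-- ===== VERDICT (by name: the statement is the Claim_ definition above) =====
theorem listarKeyword_spec : Claim_equal_listarKeyword := by
  intro bd _
  show listarKeyword bd = listarKeyword_alt bd
  unfold listarKeyword listarKeyword_alt
  have hstep :
      (fun (st : List String × List (List Char)) (d : List (String × String)) =>
        match pvLookupA d with
        | none => st
        | some kw =>
          (PySem.Chars.splitOn kw.toList [',']).foldl (fun st2 elem =>
              let t := pvTruncA elem
              let elem2 := PySem.Chars.stripChars (PySem.Chars.strip (PySem.Chars.upper t)) ['.']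
              if st2.2.contains elem2 then st2
              else (st2.1 ++ [String.ofList (PySem.Chars.strip t)], st2.2 ++ [elem2])) st)
      = (fun (st : List String × PySem.Set (List Char)) (d : List (String × String)) =>
        match List.lookup "keywords" d with
        | none => st
        | some kw =>
          (PySem.Chars.splitOn kw.toList [',']).foldl (fun st2 elem =>
              let cut := pvCutB elem
              let key := PySem.Chars.stripChars (PySem.Chars.strip (PySem.Chars.upper cut)) ['.']
              if PySem.Set.contains st2.2 key then st2
              else (st2.1 ++ [String.ofList (PySem.Chars.strip cut)], PySem.Set.add st2.2 key)) st) := by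
    funext st d
    rw [← pvLookup_eq]
    cases pvLookupA d with
    | none => rfl
    | some kw =>
      simp only
      congr 1
      funext st2 elem
      simp only [pvTrunc_eq_cut, PySem.Set.contains_eq_listContains]
      split_ifs with hmem
      · rfl
      · rw [PySem.Set.add_eq_ite, if_neg (by simpa using hmem)]
  rw [hstep]
  rfl
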